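-- pv_equiv track=rewrite | github.com/yosato/myPythonLibs_old | pythonlib_ys/main.py | merge_countdics
-- ===== SOURCE A (Python) =====
-- def merge_countdics(Dic1,Dic2):
--     NewDic={}
--     Only1=set(Dic1.keys())-set(Dic2.keys())
--     Only2=set(Dic2.keys())-set(Dic1.keys())
--     for Key,Cnt in Dic1.items():
--         if Key in Only1:
--             NewDic[Key]=Dic1[Key]
--         else:
--             NewDic[Key]=Dic1[Key]+Dic2[Key]
--     for Key in Only2:
--         NewDic[Key]=Dic2[Key]
--     return NewDic
-- ===== SOURCE B (Python) =====
-- def merge_countdics(Dic1, Dic2):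
--     NewDic = dict(Dic1)
--     for Key, Cnt in Dic2.items():
--         NewDic[Key] = NewDic.get(Key, 0) + Cnt
--     return NewDic
-- ===== Notes on version B (the rewrite author's own statement) =====
-- stated objective: simpler
-- what changed: B copies Dic1 and makes a single pass over Dic2 adding each count onto NewDic.get(Key, 0), eliminating A's two set-difference constructions and its second loop over Only2.
import Mathlib
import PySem

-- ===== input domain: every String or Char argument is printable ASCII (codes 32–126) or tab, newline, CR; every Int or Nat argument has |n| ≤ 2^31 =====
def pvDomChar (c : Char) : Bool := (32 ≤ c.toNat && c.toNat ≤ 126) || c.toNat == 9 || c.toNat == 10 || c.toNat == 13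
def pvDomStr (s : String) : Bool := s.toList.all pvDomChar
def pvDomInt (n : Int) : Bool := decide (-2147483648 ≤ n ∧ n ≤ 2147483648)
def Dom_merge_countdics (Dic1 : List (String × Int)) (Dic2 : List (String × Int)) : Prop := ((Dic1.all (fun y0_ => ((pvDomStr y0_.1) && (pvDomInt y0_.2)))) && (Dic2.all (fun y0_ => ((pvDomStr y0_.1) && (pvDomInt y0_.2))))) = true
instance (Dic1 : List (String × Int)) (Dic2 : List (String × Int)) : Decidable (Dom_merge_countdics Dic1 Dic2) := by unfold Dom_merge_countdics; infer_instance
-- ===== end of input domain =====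

-- B replaces A's two set-difference constructions and second loop by one pass over Dic2
-- adding each count onto NewDic.get(Key, 0); same return value (simpler, not claimed faster).
-- A's Python iterates the set Only2 in unspecified hash order; both ports use Dic2's
-- insertion order for those keys (dict outputs are compared ignoring order).

-- ===== PORT A =====
-- Dic1[Key] / Dic2[Key] are ported as getD _ 0: on every reached branch the key is present,
-- so the default is never used and no KeyError can occur.
def merge_countdics (Dic1 : List (String × Int)) (Dic2 : List (String × Int)) : List (String × Int) :=
  let d1 := PySem.Dict.ofList Dic1
  let d2 := PySem.Dict.ofList Dic2
  let only1 := PySem.Set.diff (PySem.Set.ofList d1.keys) (PySem.Set.ofList d2.keys)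
  let only2 := PySem.Set.diff (PySem.Set.ofList d2.keys) (PySem.Set.ofList d1.keys)
  let newDic := d1.items.foldl (fun nd p =>
      if PySem.Set.contains only1 p.1 then nd.insert p.1 (d1.getD p.1 0)
      else nd.insert p.1 (d1.getD p.1 0 + d2.getD p.1 0)) PySem.Dict.empty
  let newDic := only2.foldl (fun nd k => nd.insert k (d2.getD k 0)) newDic
  newDic.items

-- ===== PORT B =====
def merge_countdics_alt (Dic1 : List (String × Int)) (Dic2 : List (String × Int)) : List (String × Int) :=
  let newDic := PySem.Dict.ofList Dic1
  let d2 := PySem.Dict.ofList Dic2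
  (d2.items.foldl (fun nd p => nd.insert p.1 (nd.getD p.1 0 + p.2)) newDic).items

-- ===== PRECONDITION & SPEC =====
def Spec_merge_countdics (Dic1 : List (String × Int)) (Dic2 : List (String × Int)) (out : List (String × Int)) : Prop := out = merge_countdics_alt Dic1 Dic2
instance (Dic1 : List (String × Int)) (Dic2 : List (String × Int)) (out : List (String × Int)) : Decidable (Spec_merge_countdics Dic1 Dic2 out) := by unfold Spec_merge_countdics; infer_instance

-- ===== CLAIM (what is proved, stated in full; the proofs are below) =====
def Claim_equal_merge_countdics : Prop := ∀ (Dic1 : List (String × Int)) (Dic2 : List (String × Int)), Dom_merge_countdics Dic1 Dic2 → Spec_merge_countdics Dic1 Dic2 (merge_countdics Dic1 Dic2)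

-- ===== LEMMAS AND PROOFS =====

-- value of the first pair of l whose key is k, else 0 (lk d.items k is definitionally d.getD k 0)
def lk (l : List (String × Int)) (k : String) : Int :=
  (Option.map Prod.snd (l.find? (fun p => p.1 == k))).getD 0

theorem lk_of_not_mem (l : List (String × Int)) (k : String)
    (h : k ∉ l.map Prod.fst) : lk l k = 0 := by
  have : l.find? (fun p => p.1 == k) = none := by
    rw [List.find?_eq_none]
    intro p hp hbeq
    exact h (List.mem_map.mpr ⟨p, hp, by simpa using hbeq⟩)
  simp [lk, this]

theorem lk_getD (d : PySem.Dict String Int) (k : String) :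
    d.getD k 0 = lk d.items k := rfl

-- B's loop, characterised: updated copies of nd's items, then the fresh pairs of l in order
theorem B_fold (l : List (String × Int)) (nd : PySem.Dict String Int)
    (hl : (l.map Prod.fst).Nodup) (hnd : nd.keys.Nodup) :
    (l.foldl (fun nd p => nd.insert p.1 (nd.getD p.1 0 + p.2)) nd).items
      = nd.items.map (fun q => (q.1, q.2 + lk l q.1))
        ++ l.filter (fun p => !(nd.contains p.1)) := by
  induction l generalizing nd with
  | nil => simp [lk]
  | cons p t ih =>
    have hl' : (p.1 :: t.map Prod.fst).Nodup := by simpa using hl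
    have hpt : p.1 ∉ t.map Prod.fst := (List.nodup_cons.mp hl').1
    have ht : (t.map Prod.fst).Nodup := (List.nodup_cons.mp hl').2
    by_cases hc : nd.contains p.1 = true
    · rw [List.foldl_cons,
        ih _ ht (PySem.Dict.nodup_keys_insert nd p.1 _ hnd)]
      rw [PySem.Dict.items_insert_of_contains nd _ hc, List.map_map]
      have hmap : ∀ q ∈ nd.items,
          ((fun q => (q.1, q.2 + lk t q.1)) ∘
            (fun r => if r.1 == p.1 then (p.1, nd.getD p.1 0 + p.2) else r)) q
          = (q.1, q.2 + lk (p :: t) q.1) := by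
        intro q hq
        by_cases he : q.1 = p.1
        · have hget : nd.getD q.1 0 = q.2 :=
            PySem.Dict.getD_of_mem_items nd (by simpa using hq) hnd 0
          simp only [Function.comp, he, beq_self_eq_true, if_true]
          have hlk : lk (p :: t) p.1 = p.2 := by simp [lk, List.find?]
          rw [hlk, lk_of_not_mem t p.1 hpt, add_zero, ← he, hget]
        · have hbeq : (q.1 == p.1) = false := by simpa using he
          simp only [Function.comp, hbeq, Bool.false_eq_true, if_false]
          have : lk (p :: t) q.1 = lk t q.1 := by
            simp [lk, List.find?, show (p.1 == q.1) = false by simpa using Ne.symm he]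
          rw [this]
      rw [List.map_congr_left hmap]
      have hfilt : t.filter (fun r => !((nd.insert p.1 (nd.getD p.1 0 + p.2)).contains r.1))
          = t.filter (fun r => !(nd.contains r.1)) := by
        apply List.filter_congr
        intro r hr
        have hm : r.1 ∈ t.map Prod.fst := List.mem_map.mpr ⟨r, hr, rfl⟩
        have : (r.1 == p.1) = false := by
          simp only [beq_eq_false_iff_ne, ne_eq]
          intro he; exact hpt (he ▸ hm)
        rw [PySem.Dict.contains_insert, this]; simp
      rw [hfilt, List.filter_cons]
      simp [hc]
    · have hc' : nd.contains p.1 = false := by simpa using hc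
      rw [List.foldl_cons,
        ih _ ht (PySem.Dict.nodup_keys_insert nd p.1 _ hnd)]
      rw [PySem.Dict.items_insert_of_not_contains nd _ hc',
        PySem.Dict.getD_of_not_contains nd 0 hc']
      have hp1 : p.1 ∉ nd.keys := fun hm =>
        absurd ((PySem.Dict.contains_iff_mem_keys nd p.1).mpr hm) (by simp [hc'])
      rw [List.map_append]
      have hmap : nd.items.map (fun q => (q.1, q.2 + lk t q.1))
          = nd.items.map (fun q => (q.1, q.2 + lk (p :: t) q.1)) := by
        apply List.map_congr_left
        intro q hq
        have hm : q.1 ∈ nd.keys := List.mem_map.mpr ⟨q, hq, rfl⟩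
        have he : ¬ q.1 = p.1 := fun he => hp1 (he ▸ hm)
        have hx : lk (p :: t) q.1 = lk t q.1 := by
          simp [lk, List.find?, show (p.1 == q.1) = false by simpa using Ne.symm he]
        rw [hx]
      rw [hmap]
      have hfilt : t.filter (fun r => !((nd.insert p.1 (0 + p.2)).contains r.1))
          = t.filter (fun r => !(nd.contains r.1)) := by
        apply List.filter_congr
        intro r hr
        have hm : r.1 ∈ t.map Prod.fst := List.mem_map.mpr ⟨r, hr, rfl⟩
        have : (r.1 == p.1) = false := by
          simp only [beq_eq_false_iff_ne, ne_eq]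
          intro he; exact hpt (he ▸ hm)
        rw [PySem.Dict.contains_insert, this]; simp
      rw [hfilt, List.filter_cons]
      have hlkt : lk t p.1 = 0 := lk_of_not_mem t p.1 hpt
      simp [hc', hlkt, List.append_assoc]

theorem merge_countdics_spec : Claim_equal_merge_countdics := by
  intro Dic1 Dic2 _
  unfold Spec_merge_countdics merge_countdics merge_countdics_alt
  dsimp only
  set d1 := PySem.Dict.ofList Dic1 with hd1
  set d2 := PySem.Dict.ofList Dic2 with hd2
  have hk1 : d1.keys.Nodup := PySem.Dict.nodup_keys_ofList Dic1
  have hk2 : d2.keys.Nodup := PySem.Dict.nodup_keys_ofList Dic2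
  have hitems2 : d2.items.map Prod.fst = d2.keys := rfl
  have hB := B_fold d2.items d1 (by rw [hitems2]; exact hk2) hk1
  -- A's first loop: rewrite the two-branch body to one insert with an ite value
  have hstep : (fun (nd : PySem.Dict String Int) (p : String × Int) =>
      if PySem.Set.contains (PySem.Set.diff (PySem.Set.ofList d1.keys) (PySem.Set.ofList d2.keys)) p.1
      then nd.insert p.1 (d1.getD p.1 0)
      else nd.insert p.1 (d1.getD p.1 0 + d2.getD p.1 0))
      = (fun nd p => nd.insert p.1
          (if PySem.Set.contains (PySem.Set.diff (PySem.Set.ofList d1.keys) (PySem.Set.ofList d2.keys)) p.1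
           then d1.getD p.1 0 else d1.getD p.1 0 + d2.getD p.1 0)) := by
    funext nd p; split_ifs <;> rfl
  rw [hstep]
  set nd1 := d1.items.foldl (fun (nd : PySem.Dict String Int) p => nd.insert p.1
      (if PySem.Set.contains (PySem.Set.diff (PySem.Set.ofList d1.keys) (PySem.Set.ofList d2.keys)) p.1
       then d1.getD p.1 0 else d1.getD p.1 0 + d2.getD p.1 0)) PySem.Dict.empty with hnd1
  have hA1 : nd1.items = d1.items.map (fun p => (p.1,
      if PySem.Set.contains (PySem.Set.diff (PySem.Set.ofList d1.keys) (PySem.Set.ofList d2.keys)) p.1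
      then d1.getD p.1 0 else d1.getD p.1 0 + d2.getD p.1 0)) := by
    rw [hnd1]
    have h := PySem.Dict.items_foldl_insert_fresh d1.items Prod.fst
      (fun p => if PySem.Set.contains (PySem.Set.diff (PySem.Set.ofList d1.keys) (PySem.Set.ofList d2.keys)) p.1
        then d1.getD p.1 0 else d1.getD p.1 0 + d2.getD p.1 0)
      PySem.Dict.empty (by intro a _; simp [PySem.Dict.contains_empty])
      (by rw [show d1.items.map Prod.fst = d1.keys from rfl]; exact hk1)
    beta_reduce at h
    rw [h]; rfl
  have hnd1keys : nd1.keys = d1.keys := by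
    show nd1.items.map Prod.fst = d1.keys
    rw [hA1, List.map_map]; rfl
  have honly2 : ∀ a ∈ PySem.Set.diff (PySem.Set.ofList d2.keys) (PySem.Set.ofList d1.keys),
      a ∈ d2.keys ∧ a ∉ d1.keys := by
    intro a ha
    have := (PySem.Set.mem_diff _ _ _).mp ha
    exact ⟨(PySem.Set.mem_ofList _ _).mp this.1, fun h => this.2 ((PySem.Set.mem_ofList _ _).mpr h)⟩
  have hA2 := PySem.Dict.items_foldl_insert_fresh
      (PySem.Set.diff (PySem.Set.ofList d2.keys) (PySem.Set.ofList d1.keys)) (fun k => k)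
      (fun k => d2.getD k 0) nd1
      (by intro a ha
          have hnot := (honly2 a ha).2
          cases hcc : nd1.contains a with
          | false => rfl
          | true => exact absurd (hnd1keys ▸ (PySem.Dict.contains_iff_mem_keys nd1 a).mp hcc) hnot)
      (by simpa using PySem.Set.nodup_diff (PySem.Set.ofList d2.keys) (PySem.Set.ofList d1.keys) (PySem.Set.nodup_ofList d2.keys))
  beta_reduce at hA2
  rw [hA2, hA1, hB]
  congr 1
  · -- updated Dic1 items agree
    apply List.map_congr_left
    intro q hq
    have hget1 : d1.getD q.1 0 = q.2 := PySem.Dict.getD_of_mem_items d1 (by simpa using hq) hk1 0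
    have hqk : q.1 ∈ d1.keys := List.mem_map.mpr ⟨q, hq, rfl⟩
    by_cases hc : q.1 ∈ d2.keys
    · have hcond : PySem.Set.contains (PySem.Set.diff (PySem.Set.ofList d1.keys) (PySem.Set.ofList d2.keys)) q.1 = false := by
        cases h : PySem.Set.contains (PySem.Set.diff (PySem.Set.ofList d1.keys) (PySem.Set.ofList d2.keys)) q.1 with
        | false => rfl
        | true =>
          have := (PySem.Set.mem_diff _ _ _).mp ((PySem.Set.contains_iff _ _).mp h)
          exact absurd ((PySem.Set.mem_ofList _ _).mpr hc) this.2
      simp only [hcond, Bool.false_eq_true, if_false]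
      rw [hget1, ← lk_getD]
    · have hcond : PySem.Set.contains (PySem.Set.diff (PySem.Set.ofList d1.keys) (PySem.Set.ofList d2.keys)) q.1 = true := by
        rw [PySem.Set.contains_iff, PySem.Set.mem_diff]
        exact ⟨(PySem.Set.mem_ofList _ _).mpr hqk, fun h => hc ((PySem.Set.mem_ofList _ _).mp h)⟩
      have hz : lk d2.items q.1 = 0 := by
        apply lk_of_not_mem; rw [hitems2]; exact hc
      have hz' : d2.getD q.1 0 = 0 := hz
      rw [hcond, if_pos rfl, hget1, ← lk_getD, hz', add_zero]
  · -- fresh Dic2 items agree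
    have hdiff : PySem.Set.diff (PySem.Set.ofList d2.keys) (PySem.Set.ofList d1.keys)
        = d2.keys.filter (fun x => !(d1.contains x)) := by
      show (PySem.Set.ofList d2.keys).filter (fun x => !(List.contains (PySem.Set.ofList d1.keys) x))
          = d2.keys.filter (fun x => !(d1.contains x))
      rw [PySem.Set.ofList_eq_self_of_nodup d2.keys hk2]
      apply List.filter_congr
      intro x _
      have hcx : PySem.Set.contains (PySem.Set.ofList d1.keys) x = d1.contains x := by
        cases h1 : PySem.Set.contains (PySem.Set.ofList d1.keys) x with
        | true =>
          have hm := (PySem.Set.mem_ofList _ _).mp ((PySem.Set.contains_iff _ _).mp h1)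
          exact ((PySem.Dict.contains_iff_mem_keys d1 x).mpr hm).symm
        | false =>
          cases h2 : d1.contains x with
          | false => rfl
          | true =>
            have hm := (PySem.Dict.contains_iff_mem_keys d1 x).mp h2
            have h3 := (PySem.Set.contains_iff (PySem.Set.ofList d1.keys) x).mpr ((PySem.Set.mem_ofList _ _).mpr hm)
            rw [h3] at h1; exact h1.symm
      rw [show (List.contains (PySem.Set.ofList d1.keys) x) = PySem.Set.contains (PySem.Set.ofList d1.keys) x from rfl, hcx]
    rw [hdiff]
    rw [show d2.keys = d2.items.map Prod.fst from rfl, List.filter_map, List.map_map]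
    rw [show ((fun x => !d1.contains x) ∘ Prod.fst) = (fun p : String × Int => !d1.contains p.1) from rfl]
    conv_rhs => rw [← List.map_id (List.filter (fun p : String × Int => !d1.contains p.1) d2.items)]
    apply List.map_congr_left
    intro q hq
    have hqi : q ∈ d2.items := List.mem_of_mem_filter hq
    have hv : d2.getD q.1 0 = q.2 := PySem.Dict.getD_of_mem_items d2 (by simpa using hqi) hk2 0
    simp [Function.comp, hv]
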